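-- pv_equiv track=rewrite | github.com/atomantic/backDOOM | script/prepare_entity_spritesheet.py | bands_from_projection
-- ===== SOURCE A (Python) =====
-- def bands_from_projection(values: list[int], minimum: int, gap_bridge: int = 8) -> list[tuple[int, int]]:
--     raw: list[tuple[int, int]] = []
--     start: int | None = None
--
--     for index, value in enumerate(values):
--         if value >= minimum and start is None:
--             start = index
--         elif value < minimum and start is not None:
--             raw.append((start, index))
--             start = None
--
--     if start is not None:
--         raw.append((start, len(values)))
--
--     if not raw:
--         return []
--
--     merged = [raw[0]]
--     for start, end in raw[1:]:
--         previous_start, previous_end = merged[-1]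
--         if start - previous_end <= gap_bridge:
--             merged[-1] = (previous_start, end)
--         else:
--             merged.append((start, end))
--
--     return merged
-- ===== SOURCE B (Python) =====
-- def bands_from_projection(values: list[int], minimum: int, gap_bridge: int = 8) -> list[tuple[int, int]]:
--     # Single streaming pass: keep one open merged band (start, exclusive end) and flush it
--     # when the next above-threshold value is too far to bridge.
--     bands: list[tuple[int, int]] = []
--     cur: tuple[int, int] | None = None
--     for i, v in enumerate(values):
--         if v >= minimum:
--             if cur is None:
--                 cur = (i, i + 1)
--             elif i == cur[1] or i - cur[1] <= gap_bridge:
--                 cur = (cur[0], i + 1)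
--             else:
--                 bands.append(cur)
--                 cur = (i, i + 1)
--     if cur is not None:
--         bands.append(cur)
--     return bands
-- ===== Notes on version B (the rewrite author's own statement) =====
-- stated objective: simpler
-- what changed: Replaces A's two passes (collect raw above-threshold bands into an intermediate list, then merge bands across small gaps) with a single streaming pass that keeps one open merged band and flushes it when the next above-threshold index is beyond the bridgeable gap.
import Mathlib
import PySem

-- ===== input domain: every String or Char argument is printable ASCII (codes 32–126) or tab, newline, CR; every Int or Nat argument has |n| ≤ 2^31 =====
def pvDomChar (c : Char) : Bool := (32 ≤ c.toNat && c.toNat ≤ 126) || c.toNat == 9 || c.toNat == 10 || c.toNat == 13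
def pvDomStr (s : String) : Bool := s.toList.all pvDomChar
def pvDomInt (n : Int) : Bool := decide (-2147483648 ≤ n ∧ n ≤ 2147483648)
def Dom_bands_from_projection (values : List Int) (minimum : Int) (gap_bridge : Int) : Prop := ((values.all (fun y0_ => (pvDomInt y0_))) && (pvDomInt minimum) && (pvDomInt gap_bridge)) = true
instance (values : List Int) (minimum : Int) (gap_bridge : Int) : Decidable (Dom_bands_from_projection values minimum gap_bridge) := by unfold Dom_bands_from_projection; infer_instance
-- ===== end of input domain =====

-- B replaces A's two passes (collect raw bands, then merge them) by one streaming pass that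
-- maintains a single open merged band; objective: simpler (one pass, no intermediate list).

-- ===== PORT A =====
-- first pass: (raw, start) over enumerate(values)
def pvStepA (minimum : Int) (st : List (Int × Int) × Option Int) (iv : Int × Int) :
    List (Int × Int) × Option Int :=
  match st.2 with
  | none => if iv.2 ≥ minimum then (st.1, some iv.1) else st
  | some s => if iv.2 < minimum then (st.1 ++ [(s, iv.1)], none) else st

-- second pass body; 'merged' is kept REVERSED (head = merged[-1]; append = cons), reversed at the end
def pvMergeStep (gb : Int) (acc : List (Int × Int)) (b : Int × Int) : List (Int × Int) :=
  match acc with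
  | [] => [b]
  | p :: t => if b.1 - p.2 ≤ gb then (p.1, b.2) :: t else b :: p :: t

def bands_from_projection (values : List Int) (minimum : Int) (gap_bridge : Int) : List (Int × Int) :=
  let st := (PySem.List.enumerate values).foldl (pvStepA minimum) ([], none)
  let raw := match st.2 with
    | some s => st.1 ++ [(s, (values.length : Int))]
    | none => st.1
  match raw with
  | [] => []
  | b :: rest => (rest.foldl (pvMergeStep gap_bridge) [b]).reverse

-- ===== PORT B =====
-- single pass: (bands, cur); 'bands' kept REVERSED (append = cons), reversed at the end
def pvStepB (minimum gb : Int) (st : List (Int × Int) × Option (Int × Int)) (iv : Int × Int) :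
    List (Int × Int) × Option (Int × Int) :=
  if iv.2 ≥ minimum then
    match st.2 with
    | none => (st.1, some (iv.1, iv.1 + 1))
    | some c =>
      if iv.1 = c.2 ∨ iv.1 - c.2 ≤ gb then (st.1, some (c.1, iv.1 + 1))
      else (c :: st.1, some (iv.1, iv.1 + 1))
  else st

def bands_from_projection_alt (values : List Int) (minimum : Int) (gap_bridge : Int) : List (Int × Int) :=
  let st := (PySem.List.enumerate values).foldl (pvStepB minimum gap_bridge) ([], none)
  (match st.2 with
    | some c => c :: st.1
    | none => st.1).reverse

-- ===== PRECONDITION & SPEC =====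
def Spec_bands_from_projection (values : List Int) (minimum : Int) (gap_bridge : Int) (out : List (Int × Int)) : Prop := out = bands_from_projection_alt values minimum gap_bridge
instance (values : List Int) (minimum : Int) (gap_bridge : Int) (out : List (Int × Int)) : Decidable (Spec_bands_from_projection values minimum gap_bridge out) := by unfold Spec_bands_from_projection; infer_instance

-- ===== CLAIM (what is proved, stated in full; the proofs are below) =====
def Claim_equal_bands_from_projection : Prop := ∀ (values : List Int) (minimum : Int) (gap_bridge : Int), Dom_bands_from_projection values minimum gap_bridge → Spec_bands_from_projection values minimum gap_bridge (bands_from_projection values minimum gap_bridge)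

-- ===== LEMMAS AND PROOFS =====

-- Invariant relating A's first-pass state to B's streaming state after processing indices < n.
-- In the (none, some c) case c is the last merged band of A's merge of raw; in the (some s, some c)
-- case the merge of raw with the still-open raw band closed at any m has head (c.1, m).
def pvRel (gb n : Int) (stA : List (Int × Int) × Option Int)
    (stB : List (Int × Int) × Option (Int × Int)) : Prop :=
  match stA.2, stB.2 with
  | none, none => stA.1 = [] ∧ stB.1 = []
  | none, some c => stA.1.foldl (pvMergeStep gb) [] = c :: stB.1 ∧ c.2 < n
  | some s, some c => c.2 = n ∧ ∀ m : Int, (stA.1 ++ [(s, m)]).foldl (pvMergeStep gb) [] = (c.1, m) :: stB.1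
  | some _, none => False

lemma pv_step (minimum gb n x : Int) (stA : List (Int × Int) × Option Int)
    (stB : List (Int × Int) × Option (Int × Int)) (h : pvRel gb n stA stB) :
    pvRel gb (n + 1) (pvStepA minimum stA (n, x)) (pvStepB minimum gb stB (n, x)) := by
  obtain ⟨raw, start⟩ := stA
  obtain ⟨bands, cur⟩ := stB
  match start, cur with
  | none, none =>
    obtain ⟨hr, hb⟩ := h
    subst hr hb
    by_cases hx : x ≥ minimum <;>
      simp [pvStepA, pvStepB, pvRel, pvMergeStep, hx] at *
  | none, some c =>
    obtain ⟨hM, hlt⟩ := h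
    by_cases hx : x ≥ minimum
    · have hne : ¬ (n = c.2) := by omega
      by_cases hg : n - c.2 ≤ gb
      · simp only [pvStepA, pvStepB, pvRel, hx, if_pos, hne, hg, or_true]
        refine ⟨by simp, fun m => ?_⟩
        rw [List.foldl_append, hM]
        simp [pvMergeStep, hg]
      · simp only [pvStepA, pvStepB, pvRel, hx, if_pos, hne, hg, or_false, if_neg, not_false_iff]
        refine ⟨by simp, fun m => ?_⟩
        rw [List.foldl_append, hM]
        simp [pvMergeStep, hg]
    · have hx' : x < minimum := by omega
      simp only [pvStepA, pvStepB, pvRel, not_le.mpr hx']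
      exact ⟨hM, by omega⟩
  | some s, some c =>
    obtain ⟨hc2, hM⟩ := h
    by_cases hx : x ≥ minimum
    · have he : n = c.2 := hc2.symm
      have hx2 : ¬ x < minimum := not_lt.mpr hx
      simp only [pvStepA, pvStepB, pvRel, hx, if_pos, he, true_or, hx2, if_false]
      exact ⟨by simp, hM⟩
    · have hx' : x < minimum := by omega
      simp only [pvStepA, pvStepB, pvRel, if_neg hx, if_pos hx']
      constructor
      · have := hM n
        rw [this, ← hc2]
      · omega

lemma pv_loop (minimum gb : Int) (vs : List Int) : ∀ (n : Int) stA stB, pvRel gb n stA stB →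
    pvRel gb (n + vs.length) ((PySem.List.enumerate vs n).foldl (pvStepA minimum) stA)
      ((PySem.List.enumerate vs n).foldl (pvStepB minimum gb) stB) := by
  induction vs with
  | nil => intro n stA stB h; simpa [PySem.List.enumerate_nil] using h
  | cons x xs ih =>
    intro n stA stB h
    rw [PySem.List.enumerate_cons]
    simp only [List.foldl_cons]
    have h' := pv_step minimum gb n x stA stB h
    have := ih (n + 1) _ _ h'
    have harith : n + 1 + (xs.length : Int) = n + ((x :: xs).length : Int) := by
      simp [List.length_cons]; ring
    rwa [harith] at this

-- A's tail: the merge phase equals a single foldl of pvMergeStep from []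
lemma pv_merge_eq (gb : Int) (raw : List (Int × Int)) :
    (match raw with
      | [] => ([] : List (Int × Int))
      | b :: rest => (rest.foldl (pvMergeStep gb) [b]).reverse) =
    (raw.foldl (pvMergeStep gb) []).reverse := by
  cases raw <;> simp [pvMergeStep]

-- ===== VERDICT (by name: the statement is the Claim_ definition above) =====
theorem bands_from_projection_spec : Claim_equal_bands_from_projection := by
  unfold Claim_equal_bands_from_projection
  intro values minimum gap_bridge _
  unfold Spec_bands_from_projection bands_from_projection bands_from_projection_alt
  have h0 : pvRel gap_bridge 0 (([], none) : List (Int × Int) × Option Int)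
      (([], none) : List (Int × Int) × Option (Int × Int)) := ⟨rfl, rfl⟩
  have h := pv_loop minimum gap_bridge values 0 ([], none) ([], none) h0
  simp only [zero_add] at h
  set stA := (PySem.List.enumerate values).foldl (pvStepA minimum) ([], none) with hA
  set stB := (PySem.List.enumerate values).foldl (pvStepB minimum gap_bridge) ([], none) with hB
  rw [pv_merge_eq]
  obtain ⟨raw, start⟩ := stA
  obtain ⟨bands, cur⟩ := stB
  match start, cur with
  | none, none =>
    obtain ⟨hr, hb⟩ := h
    simp only at hr hb
    subst hr; subst hb
    simp
  | none, some c =>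
    obtain ⟨hM, _⟩ := h
    simp only
    rw [hM]
  | some s, some c =>
    obtain ⟨hc2, hM⟩ := h
    simp only
    rw [hM ((values.length : Int))]
    have : c = (c.1, (values.length : Int)) := by
      cases c; simp at hc2 ⊢; omega
    rw [← this]
  | some _, none => exact absurd h (by simp [pvRel])
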